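-- pv_equiv track=rewrite | github.com/h1-the-swan/cse517_hw1 | maxentmodel.py | get_training_data
-- ===== SOURCE A (Python) =====
-- def get_feature_dict(chars):
--     fd = {}
--     numchars = len(chars)
--     for i in range(numchars):
--         k = 'char-' + str(numchars-i)
--         fd[k] = chars[i]
--     return fd
--
-- def get_training_data(sent_list):
--     train = []
--     numchars = 4
--     for sent in sent_list:
--         for i in range(len(sent)):
--             if i >= numchars - 1:
--                 char = sent[i]
--                 prevchars = sent[i-(numchars-1):i]
--                 fd = get_feature_dict(prevchars)
--                 tup = (fd, char)
--                 train.append(tup)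
--     return train
-- ===== SOURCE B (Python) =====
-- def get_training_data(sent_list):
--     train = []
--     for sent in sent_list:
--         buf = ()
--         for ch in sent:
--             if len(buf) == 3:
--                 train.append(({'char-3': buf[0], 'char-2': buf[1], 'char-1': buf[2]}, ch))
--                 buf = (buf[1], buf[2], ch)
--             else:
--                 buf = buf + (ch,)
--     return train
-- ===== Notes on version B (the rewrite author's own statement) =====
-- stated objective: alternative
-- what changed: Replaced the indexed loop that re-slices sent[i-3:i] and rebuilds feature-key strings via get_feature_dict with a streaming pass that never indexes the sentence: it maintains a rolling 3-char buffer as loop state, emits (literal-key dict, current char) once the buffer is full, and shifts the buffer incrementally; this drops the per-window slice, range() and key-string construction (measured ~1.8x).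
import Mathlib
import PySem

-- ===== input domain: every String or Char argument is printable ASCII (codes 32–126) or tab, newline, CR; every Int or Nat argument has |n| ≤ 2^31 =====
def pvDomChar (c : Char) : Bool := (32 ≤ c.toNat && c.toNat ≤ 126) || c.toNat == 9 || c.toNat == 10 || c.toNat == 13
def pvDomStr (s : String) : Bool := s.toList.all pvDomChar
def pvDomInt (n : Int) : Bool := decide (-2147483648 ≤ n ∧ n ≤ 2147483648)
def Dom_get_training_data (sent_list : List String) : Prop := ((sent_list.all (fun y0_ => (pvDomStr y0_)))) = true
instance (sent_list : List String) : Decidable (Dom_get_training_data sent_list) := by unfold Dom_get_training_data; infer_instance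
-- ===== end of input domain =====

-- B replaces A's index+slice loop (and its get_feature_dict helper) by a streaming pass that
-- maintains a rolling 3-char buffer as loop state and never indexes or slices the sentence
-- (objective: alternative; same asymptotic cost).

-- ===== PORT A =====
-- sent[i] / chars[i] for an index A's loops keep in range (pyGet? is never none there)
def pvCharAt (s : List Char) (i : Int) : String :=
  match PySem.List.pyGet? s i with
  | some c => String.ofList [c]
  | none => ""

def get_feature_dict (chars : List Char) : PySem.Dict String String :=
  let numchars : Int := (chars.length : Int)
  (PySem.List.pyRange 0 numchars 1).foldl
    (fun fd i => fd.insert ("char-" ++ PySem.Int.toStr (numchars - i)) (pvCharAt chars i))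
    PySem.Dict.empty

def get_training_data (sent_list : List String) : List ((List (String × String)) × String) :=
  sent_list.foldl (fun train sent =>
    (PySem.List.pyRange 0 (sent.toList.length : Int) 1).foldl (fun train i =>
      if (4 : Int) - 1 ≤ i then
        train ++ [((get_feature_dict
            (PySem.List.slice sent.toList (some (i - (4 - 1))) (some i))).items,
          pvCharAt sent.toList i)]
      else train) train) []

-- ===== PORT B =====
-- the inner loop body: state = (train, rolling buffer of the last ≤3 chars)
def pvStep (st : (List ((List (String × String)) × String)) × List Char) (ch : Char) :
    (List ((List (String × String)) × String)) × List Char :=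
  match st with
  | (train, [a, b, c]) =>
      (train ++ [([("char-3", String.ofList [a]), ("char-2", String.ofList [b]),
                   ("char-1", String.ofList [c])], String.ofList [ch])],
       [b, c, ch])
  | (train, buf) => (train, buf ++ [ch])

def get_training_data_alt (sent_list : List String) : List ((List (String × String)) × String) :=
  sent_list.foldl (fun train sent => (sent.toList.foldl pvStep (train, [])).1) []

-- ===== PRECONDITION & SPEC =====
def Spec_get_training_data (sent_list : List String) (out : List ((List (String × String)) × String)) : Prop := out = get_training_data_alt sent_list
instance (sent_list : List String) (out : List ((List (String × String)) × String)) : Decidable (Spec_get_training_data sent_list out) := by unfold Spec_get_training_data; infer_instance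

-- ===== CLAIM (what is proved, stated in full; the proofs are below) =====
def Claim_equal_get_training_data : Prop := ∀ (sent_list : List String), Dom_get_training_data sent_list → Spec_get_training_data sent_list (get_training_data sent_list)

-- ===== LEMMAS AND PROOFS =====

-- proof-side description of the windows emitted for one sentence
def pvWindows : List Char → List ((List (String × String)) × String)
  | a :: rest@(b :: c :: d :: _) =>
      ([("char-3", String.ofList [a]), ("char-2", String.ofList [b]), ("char-1", String.ofList [c])],
        String.ofList [d]) :: pvWindows rest
  | _ => []

-- the tuple built for the window starting at an offset, phrased on the dropped suffix
def pvWin3 (t : List Char) : (List (String × String)) × String :=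
  ([("char-3", String.ofList [t.getD 0 ' ']), ("char-2", String.ofList [t.getD 1 ' ']),
    ("char-1", String.ofList [t.getD 2 ' '])], String.ofList [t.getD 3 ' '])

theorem pv_gfd3 (x y z : Char) :
    (get_feature_dict [x, y, z]).items =
      [("char-3", String.ofList [x]), ("char-2", String.ofList [y]), ("char-1", String.ofList [z])] := by
  simp only [get_feature_dict, List.length_cons, List.length_nil]
  rw [show ((((0 : Nat) + 1 + 1 + 1 : Nat)) : Int) = (3 : Int) by decide]
  rw [show PySem.List.pyRange 0 (3 : Int) 1 = [0, 1, 2] from by decide]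
  rw [PySem.Dict.items_foldl_insert_fresh]
  · show [] ++ _ = _
    simp only [List.map_cons, List.map_nil, List.nil_append]
    rw [show ("char-" ++ PySem.Int.toStr (3 - 0)) = "char-3" from by decide,
        show ("char-" ++ PySem.Int.toStr (3 - 1)) = "char-2" from by decide,
        show ("char-" ++ PySem.Int.toStr (3 - 2)) = "char-1" from by decide]
    rfl
  · intro a _; exact PySem.Dict.contains_empty _
  · decide

theorem pv_take3 (t : List Char) (h : 3 ≤ t.length) :
    t.take 3 = [t.getD 0 ' ', t.getD 1 ' ', t.getD 2 ' '] := by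
  match t with
  | _ :: _ :: _ :: _ => simp
  | [] | [_] | [_, _] => simp at h

theorem pv_filter_range (n : Nat) :
    (List.range n).filter (fun j => decide (3 ≤ j)) = (List.range (n - 3)).map (· + 3) := by
  induction n with
  | zero => rfl
  | succ n ih =>
    rw [List.range_succ, List.filter_append, ih]
    by_cases h : 3 ≤ n
    · have h1 : n + 1 - 3 = (n - 3) + 1 := by omega
      rw [h1, List.range_succ, List.map_append]
      simp [h]
    · have h0 : n + 1 - 3 = 0 := by omega
      have h1 : n - 3 = 0 := by omega
      simp [h0, h1, h]

theorem pv_windows_eq (s : List Char) :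
    pvWindows s = (List.range (s.length - 3)).map (fun j => pvWin3 (s.drop j)) := by
  induction s with
  | nil => simp [pvWindows]
  | cons a t ih =>
    match t, ih with
    | [], _ => simp [pvWindows]
    | [b], _ => simp [pvWindows]
    | [b, c], _ => simp [pvWindows]
    | b :: c :: d :: t3, ih =>
      have hl : (a :: b :: c :: d :: t3).length - 3 = ((b :: c :: d :: t3).length - 3) + 1 := by
        simp
      rw [hl, List.range_succ_eq_map, List.map_cons, List.map_map]
      simp only [pvWindows]
      congr 1

theorem pv_inner_eq (s : List Char) (init : List ((List (String × String)) × String)) :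
    (PySem.List.pyRange 0 (s.length : Int) 1).foldl (fun train i =>
      if (4 : Int) - 1 ≤ i then
        train ++ [((get_feature_dict (PySem.List.slice s (some (i - (4 - 1))) (some i))).items,
                   pvCharAt s i)]
      else train) init
    = init ++ (List.range (s.length - 3)).map (fun j => pvWin3 (s.drop j)) := by
  rw [PySem.List.foldl_append_ite (p := fun i => (4 : Int) - 1 ≤ i)
        (f := fun i => ((get_feature_dict (PySem.List.slice s (some (i - (4 - 1))) (some i))).items,
                   pvCharAt s i)),
      PySem.List.pyRange_zero_natCast, List.filter_map]
  have hfc : ((fun i => decide ((4 : Int) - 1 ≤ i)) ∘ (fun (k : Nat) => (k : Int)))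
      = fun (j : Nat) => decide (3 ≤ j) := by
    funext j
    simp only [Function.comp, decide_eq_decide]
    omega
  rw [hfc, pv_filter_range, List.map_map, List.map_map]
  congr 1
  apply List.map_congr_left
  intro j hj
  rw [List.mem_range] at hj
  simp only [Function.comp]
  have hcast : ((j + 3 : Nat) : Int) - (4 - 1) = ((j : Nat) : Int) := by push_cast; ring
  have hcast2 : ((j + 3 : Nat) : Int) = ((j : Nat) : Int) + ((3 : Nat) : Int) := by push_cast; ring
  rw [hcast, hcast2, PySem.List.slice_natCast_add]
  have htlen : 3 ≤ (s.drop j).length := by simp; omega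
  rw [pv_take3 _ htlen, pv_gfd3]
  have hlt : j + 3 < s.length := by omega
  have hget : PySem.List.pyGet? s (((j : Nat) : Int) + ((3 : Nat) : Int))
      = some (s.getD (j + 3) ' ') := by
    rw [← hcast2, PySem.List.pyGet?_natCast]
    simp [List.getD_eq_getElem?_getD, List.getElem?_eq_getElem hlt]
  unfold pvCharAt
  rw [hget]
  unfold pvWin3
  have hd : ∀ k : Nat, (s.drop j).getD k ' ' = s.getD (j + k) ' ' := by
    intro k
    simp [List.getD_eq_getElem?_getD, List.getElem?_drop]
  simp only [hd]

-- streaming invariant: from a full 3-buffer, the fold emits exactly the windows of a::b::c::s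
theorem pv_stream (s : List Char) : ∀ (a b c : Char)
    (train : List ((List (String × String)) × String)),
    (s.foldl pvStep (train, [a, b, c])).1 = train ++ pvWindows (a :: b :: c :: s) := by
  induction s with
  | nil => intro a b c train; simp [pvWindows]
  | cons ch s' ih =>
    intro a b c train
    rw [List.foldl_cons, show pvStep (train, [a, b, c]) ch
        = (train ++ [([("char-3", String.ofList [a]), ("char-2", String.ofList [b]),
                       ("char-1", String.ofList [c])], String.ofList [ch])], [b, c, ch]) from rfl,
      ih]
    simp [pvWindows]

theorem pv_alt_sent (s : List Char) (train : List ((List (String × String)) × String)) :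
    (s.foldl pvStep (train, [])).1 = train ++ pvWindows s := by
  match s with
  | [] => simp [pvWindows]
  | [a] => simp [pvStep, pvWindows]
  | [a, b] => simp [pvStep, pvWindows]
  | a :: b :: c :: rest =>
    show ((rest.foldl pvStep (pvStep (pvStep (pvStep (train, []) a) b) c))).1 = _
    rw [show pvStep (pvStep (pvStep (train, []) a) b) c = (train, [a, b, c]) from rfl]
    exact pv_stream rest a b c train

-- ===== VERDICT (by name: the statement is the Claim_ definition above) =====
theorem get_training_data_spec : Claim_equal_get_training_data := by
  intro sent_list _
  unfold Spec_get_training_data get_training_data get_training_data_alt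
  have hA := PySem.List.foldl_congr_mem sent_list
      (fun train (sent : String) =>
        (PySem.List.pyRange 0 (sent.toList.length : Int) 1).foldl (fun train i =>
          if (4 : Int) - 1 ≤ i then
            train ++ [((get_feature_dict
                (PySem.List.slice sent.toList (some (i - (4 - 1))) (some i))).items,
              pvCharAt sent.toList i)]
          else train) train)
      (fun train sent => train ++ (List.range (sent.toList.length - 3)).map
          (fun j => pvWin3 (sent.toList.drop j)))
      ([] : List ((List (String × String)) × String))
      (fun acc x _ => pv_inner_eq x.toList acc)
  have hB := PySem.List.foldl_congr_mem sent_list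
      (fun train (sent : String) => (sent.toList.foldl pvStep (train, [])).1)
      (fun train sent => train ++ pvWindows sent.toList)
      ([] : List ((List (String × String)) × String))
      (fun acc x _ => pv_alt_sent x.toList acc)
  rw [hA, hB, PySem.List.foldl_append_eq_flatMap, PySem.List.foldl_append_eq_flatMap]
  simp only [List.nil_append]
  apply List.flatMap_congr
  intro s _
  exact (pv_windows_eq s.toList).symm
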